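-- pv_equiv track=rewrite | github.com/Zanizada/BeeCrowd-codes | python/2 - AD-HOC/1032_o_primo_de_josephus.py | primo_josephus
-- ===== SOURCE A (Python) =====
-- def numero_primo(numero):
--     if numero < 2:
--         return False
--     for i in range(2, int(numero ** 0.5) + 1):
--         if numero % i == 0:
--             return False
--     return True
--
-- def proximo_primo(atual):
--     candidato = atual + 1
--     while True:
--         if numero_primo(candidato):
--             return candidato
--         candidato += 1
--
-- def primo_josephus(qntd_pessoas):
--     pessoas = list(range(1, qntd_pessoas + 1))
--     indice = 0
--     salto = 2  # primeiro primo
--     while len(pessoas) > 1: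
--         indice = (indice + salto - 1) % len(pessoas)
--         pessoas.pop(indice)
--         salto = proximo_primo(salto)
--     return pessoas[0]
-- ===== SOURCE B (Python) =====
-- def primo_josephus(qntd_pessoas):
--     # first qntd_pessoas-1 primes, each candidate tested only against the
--     # primes already found (up to its square root)
--     primes = []
--     c = 2
--     while len(primes) < qntd_pessoas - 1:
--         is_p = True
--         for q in primes:
--             if q * q > c:
--                 break
--             if c % q == 0:
--                 is_p = False
--                 break
--         if is_p:
--             primes.append(c)
--         c += 1
--     # O(n) variable-step Josephus recurrence instead of simulating eliminations
--     pos = 0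
--     for m in range(2, qntd_pessoas + 1):
--         pos = (pos + primes[qntd_pessoas - m]) % m
--     return pos + 1
-- ===== Notes on version B (the rewrite author's own statement) =====
-- stated objective: faster
-- what changed: Replaces the O(n^2) pop-based elimination simulation with the O(n) variable-step Josephus index recurrence, and generates the needed primes incrementally, testing each candidate only against the primes already found up to its square root.
-- outside the precondition, e.g. on primo_josephus(0): A raises IndexError, B returns 1
import Mathlib
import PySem

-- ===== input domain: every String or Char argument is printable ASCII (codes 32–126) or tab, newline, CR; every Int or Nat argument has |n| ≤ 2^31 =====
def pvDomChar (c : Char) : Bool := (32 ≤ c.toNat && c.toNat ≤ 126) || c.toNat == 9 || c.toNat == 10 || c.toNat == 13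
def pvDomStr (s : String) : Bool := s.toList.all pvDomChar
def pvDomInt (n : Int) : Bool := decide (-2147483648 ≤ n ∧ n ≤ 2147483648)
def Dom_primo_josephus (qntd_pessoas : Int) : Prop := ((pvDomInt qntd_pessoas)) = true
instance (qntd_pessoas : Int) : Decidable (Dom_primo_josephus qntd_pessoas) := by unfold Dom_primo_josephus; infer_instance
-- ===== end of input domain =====

-- B replaces A's O(n^2) pop-based elimination simulation by the O(n) variable-step
-- Josephus index recurrence (and tests prime candidates only against already-found primes).

-- ===== PORT A =====

-- int(numero ** 0.5) ported as the integer square root (exact where Python's float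
-- sqrt is exact, i.e. on all values small enough for A to ever finish); kernel-transparent
-- fueled scan (fuel n always suffices; isqrt_eq_sqrt below identifies it with Nat.sqrt).
def isqrtAux (n : Nat) : Nat → Nat → Nat
  | 0, r => r
  | fuel+1, r => if (r+1)*(r+1) ≤ n then isqrtAux n fuel (r+1) else r

def isqrt (n : Nat) : Nat := isqrtAux n n 0

-- the early 'return False' of A's loop is the short-circuit of '.all'
def numero_primo (numero : Int) : Bool :=
  if numero < 2 then false
  else (PySem.List.pyRange 2 ((isqrt numero.toNat : Int) + 1) 1).all
        (fun i => !(PySem.Int.mod numero i == 0))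

-- 'while True' search; the fuel only makes the search total (it is provably
-- sufficient, by Bertrand's postulate, for every call A's loop performs).
def ppGo : Nat → Int → Int
  | 0, candidato => candidato
  | fuel+1, candidato => if numero_primo candidato then candidato else ppGo fuel (candidato + 1)

def proximo_primo (atual : Int) : Int := ppGo (2 * atual.toNat + 4) (atual + 1)

-- pessoas.pop(indice) with 0 ≤ indice < len(pessoas) (always the case here) is eraseIdx;
-- the fuel (one per removed person, len(pessoas) is enough) only makes the while-loop total
def josLoop : Nat → List Int → Int → Int → List Int
  | 0, pessoas, _, _ => pessoas
  | fuel+1, pessoas, indice, salto =>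
    if 1 < pessoas.length then
      josLoop fuel
        (pessoas.eraseIdx (PySem.Int.mod (indice + salto - 1) (pessoas.length : Int)).toNat)
        (PySem.Int.mod (indice + salto - 1) (pessoas.length : Int))
        (proximo_primo salto)
    else pessoas

def primo_josephus (qntd_pessoas : Int) : Int :=
  let pessoas := PySem.List.pyRange 1 (qntd_pessoas + 1) 1
  let res := josLoop pessoas.length pessoas 0 2
  (PySem.List.pyGet? res 0).getD 0   -- pessoas[0]; the IndexError case (none) is excluded by Pre_

-- ===== PORT B =====

-- 'for q in primes: if q*q > c: break; if c % q == 0: …'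
def trialLoop (primes : List Int) (c : Int) : Bool :=
  match primes with
  | [] => true
  | q :: rest =>
    if c < q * q then true
    else if PySem.Int.mod c q == 0 then false
    else trialLoop rest c

-- the 'while len(primes) < need' loop; fuel only makes it total (sufficient by Bertrand)
def genGo : Nat → Nat → List Int → Int → List Int
  | 0, _, primes, _ => primes
  | fuel+1, need, primes, c =>
    if primes.length < need then
      genGo fuel need (if trialLoop primes c then primes ++ [c] else primes) (c + 1)
    else primes

def primo_josephus_alt (qntd_pessoas : Int) : Int :=
  let need := (qntd_pessoas - 1).toNat
  let primes := genGo (2 ^ (need + 2)) need [] 2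
  let pos := (PySem.List.pyRange 2 (qntd_pessoas + 1) 1).foldl
      (fun pos m => PySem.Int.mod (pos + (PySem.List.pyGet? primes (qntd_pessoas - m)).getD 0) m) 0
  pos + 1

-- ===== PRECONDITION & SPEC =====

-- A indexes the final one-element survivor list; for qntd_pessoas ≤ 0 that list is
-- empty and A raises IndexError, so exactly those inputs are excluded.
def Pre_primo_josephus (qntd_pessoas : Int) : Prop := 1 ≤ qntd_pessoas
instance (qntd_pessoas : Int) : Decidable (Pre_primo_josephus qntd_pessoas) := by
  unfold Pre_primo_josephus; infer_instance

def pvWitness_primo_josephus : Int := 5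

def Spec_primo_josephus (qntd_pessoas : Int) (out : Int) : Prop := out = primo_josephus_alt qntd_pessoas
instance (qntd_pessoas : Int) (out : Int) : Decidable (Spec_primo_josephus qntd_pessoas out) := by
  unfold Spec_primo_josephus; infer_instance

-- ===== CLAIM (what is proved, stated in full; the proofs are below) =====
def Claim_equal_primo_josephus : Prop := ∀ (qntd_pessoas : Int), Dom_primo_josephus qntd_pessoas → Pre_primo_josephus qntd_pessoas → Spec_primo_josephus qntd_pessoas (primo_josephus qntd_pessoas)

-- ===== LEMMAS AND PROOFS =====

-- ---------- canonical primes ----------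

theorem exists_prime_gt (p : Nat) : ∃ q, p < q ∧ Nat.Prime q := by
  obtain ⟨q, hq, hp⟩ := Nat.exists_infinite_primes (p + 1)
  exact ⟨q, by omega, hp⟩

def nextPS (p : Nat) : Nat := Nat.find (exists_prime_gt p)

theorem nextPS_lt (p : Nat) : p < nextPS p := (Nat.find_spec (exists_prime_gt p)).1
theorem nextPS_prime (p : Nat) : Nat.Prime (nextPS p) := (Nat.find_spec (exists_prime_gt p)).2
theorem nextPS_min {p q : Nat} (h1 : p < q) (h2 : Nat.Prime q) : nextPS p ≤ q :=
  Nat.find_min' (exists_prime_gt p) ⟨h1, h2⟩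
theorem nextPS_gt_not_prime {p x : Nat} (h1 : p < x) (h2 : x < nextPS p) : ¬ Nat.Prime x :=
  fun hp => absurd (nextPS_min h1 hp) (by omega)
theorem nextPS_le_two_mul {p : Nat} (hp : 1 ≤ p) : nextPS p ≤ 2 * p := by
  obtain ⟨q, hq, h1, h2⟩ := Nat.bertrand p (by omega)
  exact le_trans (nextPS_min h1 hq) h2

def NP : Nat → Nat
  | 0 => 2
  | k+1 => nextPS (NP k)

theorem NP_prime (k : Nat) : Nat.Prime (NP k) := by
  cases k with
  | zero => exact Nat.prime_two
  | succ k => exact nextPS_prime _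

theorem NP_two_le (k : Nat) : 2 ≤ NP k := (NP_prime k).two_le

theorem NP_le_pow (k : Nat) : NP k ≤ 2 ^ (k + 1) := by
  induction k with
  | zero => simp [NP]
  | succ k ih =>
    have h1 : nextPS (NP k) ≤ 2 * NP k := nextPS_le_two_mul (by have := NP_two_le k; omega)
    calc NP (k+1) = nextPS (NP k) := rfl
      _ ≤ 2 * NP k := h1
      _ ≤ 2 * 2 ^ (k+1) := by omega
      _ = 2 ^ (k+2) := by ring

def primesUpto (c : Nat) : List Nat := (List.range c).filter (fun m => Nat.Prime m)

def ksFrom (k m : Nat) : List Nat := (List.range m).map (fun j => NP (k + j))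

theorem primesUpto_succ (c : Nat) :
    primesUpto (c + 1) = primesUpto c ++ (if Nat.Prime c then [c] else []) := by
  unfold primesUpto
  rw [List.range_succ, List.filter_append]
  simp only [List.filter]
  split_ifs with h <;> simp [h]

theorem primesUpto_two : primesUpto 2 = [] := by decide

theorem primesUpto_prefix {c c' : Nat} (h : c ≤ c') : primesUpto c <+: primesUpto c' := by
  induction c' with
  | zero => simp at h; simp [h]
  | succ c' ih =>
    rcases Nat.lt_or_ge c (c' + 1) with h1 | h1
    · exact (ih (by omega)).trans (by rw [primesUpto_succ]; exact List.prefix_append _ _)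
    · have : c = c' + 1 := by omega
      simp [this]

-- primesUpto is constant on the gap between a prime and the next one
theorem primesUpto_gap {p x : Nat} (hp : Nat.Prime p) (h1 : p < x) (h2 : x ≤ nextPS p) :
    primesUpto x = primesUpto p ++ [p] := by
  induction x with
  | zero => omega
  | succ x ih =>
    rcases Nat.lt_or_ge p x with h3 | h3
    · rw [primesUpto_succ, ih h3 (by have := nextPS_lt p; omega)]
      have : ¬ Nat.Prime x := nextPS_gt_not_prime h3 (by omega)
      simp [this]
    · have : p = x := by omega
      subst this
      rw [primesUpto_succ]
      simp [hp]

theorem primesUpto_NP (k : Nat) : primesUpto (NP k) = ksFrom 0 k := by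
  induction k with
  | zero => simpa [ksFrom] using primesUpto_two
  | succ k ih =>
    have : primesUpto (NP (k+1)) = primesUpto (NP k) ++ [NP k] :=
      primesUpto_gap (NP_prime k) (nextPS_lt _) (le_refl _)
    rw [this, ih]
    simp [ksFrom, List.range_succ]

theorem length_ksFrom (k m : Nat) : (ksFrom k m).length = m := by simp [ksFrom]

theorem ksFrom_cons (k m : Nat) : ksFrom k (m + 1) = NP k :: ksFrom (k + 1) m := by
  simp [ksFrom, List.range_succ_eq_map, List.map_map, Function.comp]
  intro a _
  congr 1
  omega

-- ---------- A's prime test ----------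

theorem isqrtAux_spec (n : Nat) : ∀ (fuel r : Nat), r * r ≤ n → n < (r + 1 + fuel) * (r + 1 + fuel) →
    isqrtAux n fuel r * isqrtAux n fuel r ≤ n ∧ n < (isqrtAux n fuel r + 1) * (isqrtAux n fuel r + 1) := by
  intro fuel
  induction fuel with
  | zero =>
    intro r h1 h2
    refine ⟨h1, ?_⟩
    simpa using h2
  | succ fuel ih =>
    intro r h1 h2
    simp only [isqrtAux]
    split_ifs with h
    · exact ih (r+1) h (by rw [show r + 1 + 1 + fuel = r + 1 + (fuel + 1) from by omega]; exact h2)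
    · exact ⟨h1, not_le.mp h⟩

theorem isqrt_eq_sqrt (n : Nat) : isqrt n = Nat.sqrt n := by
  obtain ⟨h1, h2⟩ := isqrtAux_spec n n 0 (by simp) (by nlinarith)
  have hle : isqrt n ≤ Nat.sqrt n := Nat.le_sqrt'.mpr (by rw [pow_two]; exact h1)
  have hlt : Nat.sqrt n < isqrt n + 1 := Nat.sqrt_lt'.mpr (by rw [pow_two]; exact h2)
  omega

theorem numero_primo_iff (n : Int) :
    numero_primo n = true ↔ 2 ≤ n ∧ Nat.Prime n.toNat := by
  unfold numero_primo
  rw [isqrt_eq_sqrt]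
  split_ifs with h
  · constructor
    · intro hf; exact absurd hf (by simp)
    · intro ⟨h2, _⟩; omega
  · push Not at h
    rw [List.all_eq_true]
    have hnN : ((n.toNat : Nat) : Int) = n := Int.toNat_of_nonneg (by omega)
    constructor
    · intro hall
      refine ⟨h, Nat.prime_def_le_sqrt.mpr ⟨by omega, ?_⟩⟩
      intro m hm2 hms hdvd
      have hmem : ((m : Nat) : Int) ∈ PySem.List.pyRange 2 ((Nat.sqrt n.toNat : Int) + 1) 1 := by
        rw [PySem.List.mem_pyRange_one]
        constructor <;> [exact_mod_cast hm2; exact_mod_cast (by omega : (m:Int) < (Nat.sqrt n.toNat : Int) + 1)]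
      have hv := hall _ hmem
      simp only [Bool.not_eq_true', beq_eq_false_iff_ne, ne_eq] at hv
      apply hv
      rw [PySem.Int.mod_eq_zero_iff_dvd]
      rw [← hnN]
      exact_mod_cast hdvd
    · rintro ⟨h2, hp⟩ i hi
      rw [PySem.List.mem_pyRange_one] at hi
      simp only [Bool.not_eq_true', beq_eq_false_iff_ne, ne_eq]
      intro h0
      have hdvd : i ∣ n := (PySem.Int.mod_eq_zero_iff_dvd n i).mp h0
      have hi0 : (0:Int) ≤ i := by omega
      have hdN : i.toNat ∣ n.toNat := by
        rw [← Int.natCast_dvd_natCast, hnN, Int.toNat_of_nonneg hi0]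
        exact hdvd
      exact (Nat.prime_def_le_sqrt.mp hp).2 i.toNat (by omega) (by omega) hdN

-- ---------- A's next-prime search ----------

theorem ppGo_spec (f : Nat) : ∀ (c : Int), 1 ≤ c →
    (∃ p : Nat, Nat.Prime p ∧ c ≤ (p:Int) ∧ (p:Int) < c + f) →
    ∃ P : Nat, ppGo f c = (P:Int) ∧ Nat.Prime P ∧ c ≤ (P:Int) ∧
      (∀ q : Nat, Nat.Prime q → c ≤ (q:Int) → P ≤ q) := by
  induction f with
  | zero =>
    rintro c _ ⟨p, _, h1, h2⟩
    exfalso; push_cast at h2; omega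
  | succ f ih =>
    rintro c hc ⟨p, hp, hp1, hp2⟩
    by_cases hnp : numero_primo c = true
    · obtain ⟨hc2, hcp⟩ := (numero_primo_iff c).mp hnp
      refine ⟨c.toNat, ?_, hcp, by omega, ?_⟩
      · simp [ppGo, hnp, Int.toNat_of_nonneg (by omega : (0:Int) ≤ c)]
      · intro q _ hq; omega
    · have hpc : c + 1 ≤ (p : Int) := by
        rcases eq_or_lt_of_le hp1 with h | h
        · exfalso
          apply hnp
          rw [numero_primo_iff]
          refine ⟨by have := hp.two_le; omega, ?_⟩
          have : c.toNat = p := by omega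
          rw [this]; exact hp
        · omega
      obtain ⟨P, hgo, hPp, hPge, hPmin⟩ := ih (c + 1) (by omega) ⟨p, hp, hpc, by push_cast at hp2; omega⟩
      refine ⟨P, by simp [ppGo, hnp]; exact hgo, hPp, by omega, ?_⟩
      intro q hq hcq
      apply hPmin q hq
      rcases eq_or_lt_of_le hcq with h | h
      · exfalso
        apply hnp
        rw [numero_primo_iff]
        refine ⟨by have := hq.two_le; omega, ?_⟩
        have : c.toNat = q := by omega
        rw [this]; exact hq
      · omega

theorem proximo_primo_NP (k : Nat) : proximo_primo ((NP k : Nat) : Int) = ((NP (k+1) : Nat) : Int) := by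
  unfold proximo_primo
  have hp2 := NP_two_le k
  have hex : ∃ p : Nat, Nat.Prime p ∧ ((NP k : Nat) : Int) + 1 ≤ (p:Int) ∧
      (p:Int) < ((NP k : Nat) : Int) + 1 + (2 * ((NP k : Nat) : Int).toNat + 4) := by
    obtain ⟨q, hq, h1, h2⟩ := Nat.bertrand (NP k) (by omega)
    exact ⟨q, hq, by exact_mod_cast h1, by omega⟩
  obtain ⟨P, hgo, hPp, hPge, hPmin⟩ := ppGo_spec _ _ (by omega) hex
  rw [hgo]
  congr 1
  have h1 : P ≤ nextPS (NP k) := by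
    apply hPmin _ (nextPS_prime _)
    have := nextPS_lt (NP k)
    omega
  have h2 : nextPS (NP k) ≤ P := by
    apply nextPS_min _ hPp
    omega
  show P = NP (k+1)
  have : NP (k+1) = nextPS (NP k) := rfl
  omega

-- ---------- B's prime test ----------

theorem trialLoop_true_of (c : Nat) : ∀ (ps : List Nat), (∀ q ∈ ps, ¬ (q ∣ c)) →
    trialLoop (ps.map (fun x : Nat => (x : Int))) (c : Int) = true := by
  intro ps
  induction ps with
  | nil => intro _; rfl
  | cons q rest ih =>
    intro hnd
    simp only [List.map_cons, trialLoop]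
    split_ifs with h1 h2
    · rfl
    · exfalso
      apply hnd q (List.mem_cons_self ..)
      have : PySem.Int.mod (c:Int) (q:Int) = 0 := by simpa using h2
      rw [PySem.Int.mod_eq_zero_iff_dvd] at this
      exact_mod_cast this
    · exact ih (fun x hx => hnd x (List.mem_cons_of_mem _ hx))

theorem trialLoop_false_of (c : Nat) : ∀ (ps : List Nat), List.Pairwise (· < ·) ps →
    ∀ q0 ∈ ps, q0 * q0 ≤ c → q0 ∣ c →
    trialLoop (ps.map (fun x : Nat => (x : Int))) (c : Int) = false := by
  intro ps
  induction ps with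
  | nil => intro _ q0 h; simp at h
  | cons q rest ih =>
    intro hpw q0 hq0 hsq hdvd
    obtain ⟨hlt, hpw'⟩ := List.pairwise_cons.mp hpw
    have hqle : q ≤ q0 := by
      rcases List.mem_cons.mp hq0 with rfl | hm
      · exact le_refl _
      · exact le_of_lt (hlt _ hm)
    simp only [List.map_cons, trialLoop]
    split_ifs with h1 h2
    · exfalso
      have : q * q ≤ q0 * q0 := Nat.mul_le_mul hqle hqle
      have : ((q * q : Nat) : Int) ≤ (c : Int) := by exact_mod_cast le_trans this hsq
      push_cast at this h1
      omega
    · rfl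
    · rcases List.mem_cons.mp hq0 with rfl | hm
      · exfalso
        apply h2
        simp only [beq_iff_eq]
        rw [PySem.Int.mod_eq_zero_iff_dvd]
        exact_mod_cast hdvd
      · exact ih hpw' q0 hm hsq hdvd

theorem pairwise_primesUpto (c : Nat) : List.Pairwise (· < ·) (primesUpto c) :=
  (List.pairwise_lt_range).filter _

theorem mem_primesUpto {c q : Nat} : q ∈ primesUpto c ↔ q < c ∧ Nat.Prime q := by
  unfold primesUpto
  simp [List.mem_filter, List.mem_range]

theorem trialLoop_iff (c : Nat) (hc : 2 ≤ c) :
    trialLoop ((primesUpto c).map (fun x : Nat => (x : Int))) (c : Int) = true ↔ Nat.Prime c := by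
  constructor
  · intro htl
    by_contra hnp
    have hq0p : Nat.Prime c.minFac := Nat.minFac_prime (by omega)
    have hsq : c.minFac * c.minFac ≤ c := by
      have := Nat.minFac_sq_le_self (by omega) hnp
      nlinarith [this]
    have h2q : 2 ≤ c.minFac := hq0p.two_le
    have hlt : c.minFac < c := by nlinarith
    have := trialLoop_false_of c (primesUpto c) (pairwise_primesUpto c) c.minFac
      (mem_primesUpto.mpr ⟨hlt, hq0p⟩) hsq (Nat.minFac_dvd c)
    rw [htl] at this
    exact absurd this (by simp)
  · intro hp
    apply trialLoop_true_of
    intro q hq hdvd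
    obtain ⟨hqc, hqp⟩ := mem_primesUpto.mp hq
    rcases (Nat.Prime.eq_one_or_self_of_dvd hp q hdvd) with h | h
    · exact absurd h (by have := hqp.two_le; omega)
    · omega

-- ---------- B's generation loop ----------

theorem genGo_eq (f : Nat) : ∀ (need c : Nat), 2 ≤ c → c ≤ NP need → NP need < c + f →
    genGo f need ((primesUpto c).map (fun x : Nat => (x : Int))) (c : Int)
      = (ksFrom 0 need).map (fun x : Nat => (x : Int)) := by
  induction f with
  | zero => intro need c _ h1 h2; omega
  | succ f ih =>
    intro need c h2c hle hfuel
    simp only [genGo]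
    by_cases hl : (primesUpto c).length < need
    · rw [if_pos (by simpa using hl)]
      have hcNP : c < NP need := by
        rcases eq_or_lt_of_le hle with h | h
        · exfalso
          have : (primesUpto c).length = need := by
            rw [h, primesUpto_NP, length_ksFrom]
          omega
        · exact h
      have step : (if trialLoop ((primesUpto c).map (fun x : Nat => (x : Int))) (c:Int)
            then (primesUpto c).map (fun x : Nat => (x : Int)) ++ [(c:Int)]
            else (primesUpto c).map (fun x : Nat => (x : Int)))
          = (primesUpto (c+1)).map (fun x : Nat => (x : Int)) := by
        by_cases hcp : Nat.Prime c
        · rw [if_pos ((trialLoop_iff c h2c).mpr hcp), primesUpto_succ, if_pos hcp]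
          simp
        · rw [if_neg (fun h => hcp ((trialLoop_iff c h2c).mp h)), primesUpto_succ, if_neg hcp]
          simp
      rw [step, show (c:Int) + 1 = ((c+1 : Nat) : Int) by push_cast; ring]
      exact ih need (c+1) (by omega) (by omega) (by omega)
    · have hpre : primesUpto c <+: ksFrom 0 need := by
        rw [← primesUpto_NP]; exact primesUpto_prefix hle
      have hlen : (primesUpto c).length = need := by
        have := hpre.length_le
        rw [length_ksFrom] at this
        omega
      rw [if_neg (by simp [hlen])]
      rw [hpre.eq_of_length (by rw [hlen, length_ksFrom])]

-- ---------- the Josephus core ----------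

def simN : List Int → Nat → List Nat → List Int
  | l, _, [] => l
  | l, i, k :: ks => simN (l.eraseIdx ((i + k - 1) % l.length)) ((i + k - 1) % l.length) ks

def FN : List Nat → Nat
  | [] => 0
  | k :: ks => (FN ks + k) % (ks.length + 2)

theorem FN_lt (ks : List Nat) : FN ks < ks.length + 1 := by
  cases ks with
  | nil => simp [FN]
  | cons k ks => exact Nat.lt_of_lt_of_le (Nat.mod_lt _ (by omega)) (by simp)

theorem unerase_arith {m j a : Nat} (hj : j < m) (ha : a < m - 1) (hm : 2 ≤ m) :
    (if (j + a) % (m-1) < j then (j + a) % (m-1) else (j + a) % (m-1) + 1) = (j + 1 + a) % m := by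
  have e1 : (j + a) % (m-1) = if j + a < m - 1 then j + a else j + a - (m-1) := by
    split_ifs with h
    · exact Nat.mod_eq_of_lt h
    · rw [Nat.mod_eq_sub_mod (by omega)]
      exact Nat.mod_eq_of_lt (by omega)
  have e2 : (j + 1 + a) % m = if j + 1 + a < m then j + 1 + a else j + 1 + a - m := by
    split_ifs with h
    · exact Nat.mod_eq_of_lt h
    · rw [Nat.mod_eq_sub_mod (by omega)]
      exact Nat.mod_eq_of_lt (by omega)
  rw [e1, e2]
  split_ifs <;> omega

theorem simN_eq : ∀ (ks : List Nat) (l : List Int) (i : Nat),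
    l.length = ks.length + 1 → (∀ k ∈ ks, 1 ≤ k) →
    simN l i ks = [l.getD ((i + FN ks) % l.length) 0] := by
  intro ks
  induction ks with
  | nil =>
    intro l i h _
    match l, h with
    | [x], _ => simp [simN, FN, Nat.mod_one]
  | cons k ks ih =>
    intro l i hlen hmem
    have hm2 : l.length = ks.length + 2 := by simp at hlen; omega
    have hk1 : 1 ≤ k := hmem k (List.mem_cons_self ..)
    simp only [simN]
    set j := (i + k - 1) % l.length with hjdef
    have hjm : j < l.length := Nat.mod_lt _ (by omega)
    have hlen' : (l.eraseIdx j).length = ks.length + 1 := by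
      rw [List.length_eraseIdx]; split <;> omega
    rw [ih _ _ hlen' (fun x hx => hmem x (List.mem_cons_of_mem _ hx))]
    congr 1
    set a := FN ks with hadef
    have ha : a < ks.length + 1 := FN_lt ks
    set m := l.length with hmdef
    have ha' : a < m - 1 := by omega
    set t := (j + a) % (m - 1) with htdef
    have ht : t < m - 1 := Nat.mod_lt _ (by omega)
    have hidx : (j + a) % (l.eraseIdx j).length = t := by rw [hlen']; congr 1; omega
    rw [hidx]
    have hg : (l.eraseIdx j).getD t 0 = if t < j then l.getD t 0 else l.getD (t+1) 0 := by
      rw [List.getD_eq_getElem _ _ (by omega : t < (l.eraseIdx j).length)]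
      rw [List.getElem_eraseIdx]
      split_ifs with h
      · rw [List.getD_eq_getElem _ _ (by omega)]
      · rw [List.getD_eq_getElem _ _ (by omega)]
    rw [hg]
    have harith := unerase_arith hjm ha' (by omega : 2 ≤ m)
    rw [show (if t < j then l.getD t 0 else l.getD (t+1) 0)
          = l.getD ((j + 1 + a) % m) 0 by rw [← harith]; split_ifs <;> rfl]
    congr 1
    -- (j + 1 + a) % m = (i + FN (k :: ks)) % m
    have hfn : FN (k :: ks) = (a + k) % m := by simp [FN, ← hadef, hm2]
    rw [hfn, hjdef]
    calc ((i + k - 1) % m + 1 + a) % m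
        = ((i + k - 1) % m + (1 + a)) % m := by ring_nf
      _ = (i + k - 1 + (1 + a)) % m := Nat.mod_add_mod _ _ _
      _ = (i + (a + k)) % m := by congr 1; omega
      _ = (i % m + (a + k) % m) % m := by rw [Nat.add_mod]
      _ = (i + (a + k) % m) % m := by rw [Nat.mod_add_mod]


-- ---------- glue: A's loop is simN over the NP chain ----------

theorem josLoop_simN : ∀ (fuel : Nat) (l : List Int) (i : Int) (k : Nat),
    l.length ≤ fuel + 1 → 0 ≤ i →
    josLoop fuel l i ((NP k : Nat) : Int) = simN l i.toNat (ksFrom k (l.length - 1)) := by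
  intro fuel
  induction fuel with
  | zero =>
    intro l i k hlen hi
    have h0 : l.length - 1 = 0 := by omega
    simp only [josLoop]
    rw [h0]
    simp [ksFrom, simN]
  | succ fuel ih =>
    intro l i k hlen hi
    simp only [josLoop]
    by_cases h : 1 < l.length
    · rw [if_pos h]
      have hnp := NP_two_le k
      have hcast : i + ((NP k : Nat) : Int) - 1 = ((i.toNat + NP k - 1 : Nat) : Int) := by omega
      have hj : PySem.Int.mod (i + ((NP k : Nat) : Int) - 1) (l.length : Int)
          = (((i.toNat + NP k - 1) % l.length : Nat) : Int) := by
        rw [hcast, PySem.Int.mod_natCast]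
      rw [hj, proximo_primo_NP k]
      set jn := (i.toNat + NP k - 1) % l.length with hjn
      have hjm : jn < l.length := Nat.mod_lt _ (by omega)
      have htn : ((jn : Nat) : Int).toNat = jn := Int.toNat_natCast jn
      rw [htn]
      have hlen' : (l.eraseIdx jn).length = l.length - 1 := by
        rw [List.length_eraseIdx]; split <;> omega
      have hks : ksFrom k (l.length - 1) = NP k :: ksFrom (k+1) (l.length - 2) := by
        rw [show l.length - 1 = (l.length - 2) + 1 by omega, ksFrom_cons]
      rw [hks]
      simp only [simN]
      rw [ih (l.eraseIdx jn) ((jn : Nat) : Int) (k+1) (by rw [hlen']; omega)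
            (Int.natCast_nonneg jn)]
      rw [htn, hlen', show l.length - 1 - 1 = l.length - 2 by omega]
    · rw [if_neg h]
      have h0 : l.length - 1 = 0 := by omega
      rw [h0]
      simp [ksFrom, simN]

-- ---------- glue: B's fold is FN ----------

theorem bfold : ∀ (ks : List Nat) (q : Int), q = (ks.length : Int) + 1 →
    (PySem.List.pyRange 2 (q+1) 1).foldl
      (fun pos m => PySem.Int.mod (pos + (PySem.List.pyGet? (ks.map (fun x : Nat => (x : Int))) (q - m)).getD 0) m) 0
      = ((FN ks : Nat) : Int) := by
  intro ks
  induction ks with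
  | nil =>
    intro q hq
    simp only [List.length_nil, Nat.cast_zero, zero_add] at hq
    subst hq
    rw [show (1:Int) + 1 = 2 by norm_num, PySem.List.pyRange_one_eq_nil (by norm_num)]
    simp [FN]
  | cons k ks ih =>
    intro q hq
    simp only [List.length_cons, Nat.cast_add, Nat.cast_one] at hq
    have h2q : (2:Int) ≤ q := by omega
    rw [PySem.List.pyRange_one_succ_right h2q, List.foldl_append]
    have hpref : (PySem.List.pyRange 2 q 1).foldl
        (fun pos m => PySem.Int.mod (pos + (PySem.List.pyGet? ((k :: ks).map (fun x : Nat => (x : Int))) (q - m)).getD 0) m) 0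
        = ((FN ks : Nat) : Int) := by
      rw [PySem.List.foldl_congr_mem _ _
        (fun pos m => PySem.Int.mod (pos + (PySem.List.pyGet? (ks.map (fun x : Nat => (x : Int))) (q - 1 - m)).getD 0) m) _ ?_]
      · have := ih (q - 1) (by omega)
        rw [show q - 1 + 1 = q by ring] at this
        exact this
      · intro acc m hm
        rw [PySem.List.mem_pyRange_one] at hm
        have hd1 : 1 ≤ (q - m).toNat := by omega
        congr 2
        rw [show q - m = (((q - m).toNat : Nat) : Int) by omega, PySem.List.pyGet?_natCast]
        rw [show (q - m).toNat = ((q - m).toNat - 1) + 1 by omega]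
        rw [List.map_cons, List.getElem?_cons_succ]
        rw [show q - 1 - m = ((((q - m).toNat - 1) : Nat) : Int) by omega, PySem.List.pyGet?_natCast]
    rw [hpref]
    show PySem.Int.mod (((FN ks : Nat) : Int) + (PySem.List.pyGet? ((k :: ks).map (fun x : Nat => (x : Int))) (q - q)).getD 0) q
        = ((FN (k :: ks) : Nat) : Int)
    rw [show q - q = (((0:Nat)) : Int) by omega, PySem.List.pyGet?_natCast]
    simp only [List.map_cons, List.getElem?_cons_zero, Option.getD_some]
    rw [show q = ((ks.length + 2 : Nat) : Int) by push_cast; omega]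
    rw [show ((FN ks : Nat) : Int) + ((k : Nat) : Int) = ((FN ks + k : Nat) : Int) by push_cast; ring]
    rw [PySem.Int.mod_natCast]
    simp [FN]

-- ===== VERDICT (by name: the statement is the Claim_ definition above) =====
theorem primo_josephus_spec : Claim_equal_primo_josephus := by
  unfold Claim_equal_primo_josephus Spec_primo_josephus Pre_primo_josephus
  intro q _ hq
  have hn1 : 1 ≤ q.toNat := by omega
  set n := q.toNat with hn
  set ks := ksFrom 0 (n-1) with hks
  have hksl : ks.length = n - 1 := length_ksFrom _ _
  have hfn : FN ks < n := by have := FN_lt ks; omega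
  have hA : primo_josephus q = 1 + ((FN ks : Nat) : Int) := by
    simp only [primo_josephus]
    have hlenp : (PySem.List.pyRange 1 (q+1) 1).length = n := by
      rw [PySem.List.length_pyRange_one]; omega
    rw [show (2:Int) = ((NP 0 : Nat) : Int) by norm_num [NP]]
    rw [josLoop_simN (PySem.List.pyRange 1 (q+1) 1).length _ 0 0 (by omega) (le_refl 0)]
    rw [hlenp, show (0:Int).toNat = 0 from rfl, ← hks]
    rw [simN_eq ks _ 0 (by rw [hlenp, hksl]; omega) ?side]
    case side =>
      intro x hx
      simp only [hks, ksFrom, List.mem_map, List.mem_range] at hx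
      obtain ⟨j, _, rfl⟩ := hx
      have := NP_two_le (0 + j)
      omega
    rw [hlenp, Nat.zero_add, Nat.mod_eq_of_lt hfn]
    have hget : (PySem.List.pyRange 1 (q+1) 1).getD (FN ks) 0 = 1 + ((FN ks : Nat) : Int) := by
      rw [List.getD_eq_getElem _ _ (by omega : FN ks < (PySem.List.pyRange 1 (q+1) 1).length)]
      rw [PySem.List.getElem_pyRange_one]
    rw [hget]
    rw [show ((0:Int)) = (((0:Nat)) : Int) from rfl, PySem.List.pyGet?_natCast]
    simp only [List.getElem?_cons_zero, Option.getD_some]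
  have hB : primo_josephus_alt q = ((FN ks : Nat) : Int) + 1 := by
    simp only [primo_josephus_alt]
    have hneed : (q - 1).toNat = n - 1 := by omega
    rw [hneed]
    have hgen : genGo (2 ^ ((n-1) + 2)) (n-1) [] 2 = (ksFrom 0 (n-1)).map (fun x : Nat => (x : Int)) := by
      have h0 : ([] : List Int) = (primesUpto 2).map (fun x : Nat => (x : Int)) := by
        rw [primesUpto_two]; rfl
      rw [h0, show (2:Int) = (((2:Nat)) : Int) from rfl]
      apply genGo_eq _ (n-1) 2 (le_refl 2) (NP_two_le _)
      have h1 := NP_le_pow (n-1)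
      have h2 : (2:Nat) ^ ((n-1) + 1) ≤ 2 ^ ((n-1) + 2) := Nat.pow_le_pow_right (by omega) (by omega)
      omega
    rw [hgen, ← hks]
    rw [bfold ks q (by rw [hksl]; omega)]
  rw [hA, hB]
  ring
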